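-- pv_equiv track=rewrite | github.com/Chavez0296/python | unitThreesessionOne.py | arrange_attendees_by_priority
-- ===== SOURCE A (Python) =====
-- def arrange_attendees_by_priority(attendees, priority):
-- #   smaller = []
-- #   eq = []
-- #   larger = []
-- #   for prio in attendees:
-- #     if prio < priority:
-- #       smaller.append(prio)
-- #     elif prio == priority:
-- #       eq.append(prio)
-- #     else:
-- #       larger.append(prio)
--
-- #   return smaller + eq + larger
-- #   Brute Force Solution
--
-- #   low, mid, high = 0,0, len(attendees) - 1
--
-- #   while mid <= high:
-- #     if attendees[mid] < priority:
-- #       attendees[low], attendees[mid] = attendees[mid], attendees[low]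
-- #       low += 1
-- #       mid += 1
-- #     elif attendees[mid] > priority:
-- #       attendees[mid], attendees[high] = attendees[high], attendees[mid]
-- #       high -= 1
-- #     else:
-- #       mid += 1
--
-- #   return attendees
--
-- # Three pointer solution (O(n) time, O(n) space)
--   n = len(attendees)
--   l = 0
--
--   for r in range(n):
--     if attendees[r] < priority:
--       val = attendees[r]
--       attendees[l+1 : r+1] = attendees[l : r]
--       attendees[l] = val
--       l += 1
--
--   for r in range(l,n):
--     if attendees[r] == priority:
--       val = attendees[r]
--       attendees[l+1 : r+1] = attendees[l : r]
--       attendees[l] = val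
--       l += 1
--
--   return attendees
--   #time and space complexity (O(n^2))
--   pass
-- ===== SOURCE B (Python) =====
-- def arrange_attendees_by_priority(attendees, priority):
--     smaller = []
--     equal = []
--     larger = []
--     for x in attendees:
--         if x < priority:
--             smaller.append(x)
--         elif x == priority:
--             equal.append(x)
--         else:
--             larger.append(x)
--     return smaller + equal + larger
-- ===== Notes on version B (the rewrite author's own statement) =====
-- stated objective: faster
-- what changed: A repeatedly shifts whole list segments with slice assignments to move each element into place (quadratic); B makes one pass collecting smaller/equal/larger lists and concatenates them.
import Mathlib
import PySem

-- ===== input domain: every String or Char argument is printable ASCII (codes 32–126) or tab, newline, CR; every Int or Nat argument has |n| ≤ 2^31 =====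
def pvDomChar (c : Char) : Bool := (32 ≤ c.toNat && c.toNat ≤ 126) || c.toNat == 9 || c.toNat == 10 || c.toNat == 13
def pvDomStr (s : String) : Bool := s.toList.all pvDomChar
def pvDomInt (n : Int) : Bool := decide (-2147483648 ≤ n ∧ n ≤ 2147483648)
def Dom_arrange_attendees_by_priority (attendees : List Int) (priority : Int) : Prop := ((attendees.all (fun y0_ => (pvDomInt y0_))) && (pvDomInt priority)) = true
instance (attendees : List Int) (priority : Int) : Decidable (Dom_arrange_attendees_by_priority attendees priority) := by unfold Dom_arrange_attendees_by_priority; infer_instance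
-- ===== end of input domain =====

-- B replaces A's quadratic slice-shifting passes by one pass collecting smaller/equal/larger
-- lists and concatenating them. A mutates `attendees` in place; the equivalence proved here is
-- about the RETURN value only (B does not mutate its argument).

-- ===== PORT A =====
-- transliteration of A's in-place move: val = xs[r]; xs[l+1:r+1] = xs[l:r]; xs[l] = val
def pvShift (xs : List Int) (l r : Int) : List Int :=
  let val := (PySem.List.pyGet? xs r).getD 0   -- r is always a valid index in A's loops
  let seg := PySem.List.slice xs (some l) (some r)
  let ys := PySem.List.slice xs none (some (l+1)) ++ seg ++ PySem.List.slice xs (some (r+1)) none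
  PySem.List.slice ys none (some l) ++ [val] ++ PySem.List.slice ys (some (l+1)) none

def arrange_attendees_by_priority (attendees : List Int) (priority : Int) : List Int :=
  let n : Int := (attendees.length : Int)
  let st1 := (PySem.List.pyRange 0 n 1).foldl
    (fun (st : List Int × Int) r =>
      if (PySem.List.pyGet? st.1 r).getD 0 < priority then (pvShift st.1 st.2 r, st.2 + 1) else st)
    (attendees, 0)
  let st2 := (PySem.List.pyRange st1.2 n 1).foldl
    (fun (st : List Int × Int) r =>
      if (PySem.List.pyGet? st.1 r).getD 0 = priority then (pvShift st.1 st.2 r, st.2 + 1) else st)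
    st1
  st2.1

-- ===== PORT B =====
def arrange_attendees_by_priority_alt (attendees : List Int) (priority : Int) : List Int :=
  let acc := attendees.foldl
    (fun (acc : List Int × List Int × List Int) x =>
      if x < priority then (acc.1 ++ [x], acc.2.1, acc.2.2)
      else if x = priority then (acc.1, acc.2.1 ++ [x], acc.2.2)
      else (acc.1, acc.2.1, acc.2.2 ++ [x]))
    ([], [], [])
  acc.1 ++ acc.2.1 ++ acc.2.2

-- ===== PRECONDITION & SPEC =====
def Spec_arrange_attendees_by_priority (attendees : List Int) (priority : Int) (out : List Int) : Prop := out = arrange_attendees_by_priority_alt attendees priority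
instance (attendees : List Int) (priority : Int) (out : List Int) : Decidable (Spec_arrange_attendees_by_priority attendees priority out) := by unfold Spec_arrange_attendees_by_priority; infer_instance

-- ===== CLAIM (what is proved, stated in full; the proofs are below) =====
def Claim_equal_arrange_attendees_by_priority : Prop := ∀ (attendees : List Int) (priority : Int), Dom_arrange_attendees_by_priority attendees priority → Spec_arrange_attendees_by_priority attendees priority (arrange_attendees_by_priority attendees priority)

-- ===== LEMMAS AND PROOFS =====

lemma pyGet_mid (S T rest : List Int) (x : Int) :
    (PySem.List.pyGet? (S ++ T ++ x :: rest) ((S.length : Int) + (T.length : Int))).getD 0 = x := by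
  have h : ((S.length : Int) + (T.length : Int)) = ((S.length + T.length : Nat) : Int) := by push_cast; ring
  rw [h, PySem.List.pyGet?_natCast]
  simp

-- A's slice-shuffle rotates the element at index |S|+|T| to position |S|
lemma pvShift_eq (S T rest : List Int) (x : Int) :
    pvShift (S ++ T ++ x :: rest) (S.length : Int) ((S.length : Int) + (T.length : Int))
      = S ++ x :: (T ++ rest) := by
  unfold pvShift
  rw [pyGet_mid]
  have h1 : (S.length : Int) + (T.length : Int) = ((S.length + T.length : Nat) : Int) := by push_cast; ring
  have h2 : (S.length : Int) + 1 = ((S.length + 1 : Nat) : Int) := by push_cast; ring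
  have h3 : ((S.length + T.length : Nat) : Int) + 1 = ((S.length + T.length + 1 : Nat) : Int) := by push_cast; ring
  simp only [h1, h2, h3, PySem.List.slice_natCast, PySem.List.slice_to_natCast,
    PySem.List.slice_from_natCast]
  have hseg : ((S ++ T ++ x :: rest).drop S.length).take (S.length + T.length - S.length) = T := by
    simp
  have htake : (S ++ T ++ x :: rest).take (S.length + 1) = S ++ (T ++ x :: rest).take 1 := by
    rw [List.append_assoc, List.take_append]
    have e : S.length + 1 - S.length = 1 := by omega
    rw [e, List.take_of_length_le (by omega)]
  have hdrop : (S ++ T ++ x :: rest).drop (S.length + T.length + 1) = rest := by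
    have e : S ++ T ++ x :: rest = (S ++ T ++ [x]) ++ rest := by simp
    have hl : (S ++ T ++ [x]).length = S.length + T.length + 1 := by simp; omega
    rw [e, ← hl, List.drop_left]
  rw [hseg, htake, hdrop]
  have hlen1 : ((T ++ x :: rest).take 1).length = 1 := by cases T <;> simp
  obtain ⟨a, ha⟩ := List.length_eq_one_iff.mp hlen1
  rw [ha]
  have e2 : S ++ [a] ++ T ++ rest = (S ++ [a]) ++ (T ++ rest) := by simp
  have hsl : (S ++ [a]).length = S.length + 1 := by simp
  rw [e2, ← hsl, List.drop_left, List.take_append_of_le_length (by simp),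
    List.take_append_of_le_length (by simp), List.take_length]
  simp

-- invariant of both of A's passes: a stable two-way partition of the unprocessed suffix
lemma loop_inv (c : Int → Prop) [DecidablePred c] :
    ∀ (rest S T : List Int),
    (PySem.List.pyRange ((S.length : Int) + (T.length : Int))
        ((S.length : Int) + (T.length : Int) + (rest.length : Int)) 1).foldl
      (fun (st : List Int × Int) r =>
        if c ((PySem.List.pyGet? st.1 r).getD 0) then (pvShift st.1 st.2 r, st.2 + 1) else st)
      (S ++ T ++ rest, (S.length : Int))
    = (S ++ rest.filter (fun y => decide (c y)) ++ T ++ rest.filter (fun y => !decide (c y)),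
       ((S.length + (rest.filter (fun y => decide (c y))).length : Nat) : Int)) := by
  intro rest
  induction rest with
  | nil =>
    intro S T
    simp
  | cons x rest ih =>
    intro S T
    have hlt : (S.length : Int) + (T.length : Int)
        < (S.length : Int) + (T.length : Int) + ((x :: rest).length : Int) := by
      simp only [List.length_cons]; push_cast; omega
    rw [PySem.List.pyRange_one_cons hlt]
    simp only [List.foldl_cons]
    rw [pyGet_mid]
    by_cases hc : c x
    · rw [if_pos hc, pvShift_eq]
      have e1 : S ++ x :: (T ++ rest) = (S ++ [x]) ++ T ++ rest := by simp
      have e2 : (S.length : Int) + 1 = ((S ++ [x]).length : Int) := by simp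
      have e3 : (S.length : Int) + (T.length : Int) + 1
          = ((S ++ [x]).length : Int) + (T.length : Int) := by simp; ring
      have e4 : (S.length : Int) + (T.length : Int) + ((x :: rest).length : Int)
          = ((S ++ [x]).length : Int) + (T.length : Int) + (rest.length : Int) := by simp; ring
      rw [e1, e2, e3, e4, ih (S ++ [x]) T]
      simp [hc]
      ring
    · rw [if_neg hc]
      have e1 : S ++ T ++ x :: rest = S ++ (T ++ [x]) ++ rest := by simp
      have e3 : (S.length : Int) + (T.length : Int) + 1
          = (S.length : Int) + ((T ++ [x]).length : Int) := by simp; ring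
      have e4 : (S.length : Int) + (T.length : Int) + ((x :: rest).length : Int)
          = (S.length : Int) + ((T ++ [x]).length : Int) + (rest.length : Int) := by simp; ring
      rw [e1, e3, e4, ih S (T ++ [x])]
      simp [hc]

-- B's fold accumulates the three filters
lemma alt_fold (p : Int) :
    ∀ (xs A B C : List Int),
    xs.foldl
      (fun (acc : List Int × List Int × List Int) x =>
        if x < p then (acc.1 ++ [x], acc.2.1, acc.2.2)
        else if x = p then (acc.1, acc.2.1 ++ [x], acc.2.2)
        else (acc.1, acc.2.1, acc.2.2 ++ [x])) (A, B, C)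
    = (A ++ xs.filter (fun y => decide (y < p)),
       B ++ (xs.filter (fun y => !decide (y < p))).filter (fun y => decide (y = p)),
       C ++ (xs.filter (fun y => !decide (y < p))).filter (fun y => !decide (y = p))) := by
  intro xs
  induction xs with
  | nil => intro A B C; simp
  | cons x xs ih =>
    intro A B C
    simp only [List.foldl_cons]
    by_cases h1 : x < p
    · rw [if_pos h1, ih]
      simp [h1]
    · rw [if_neg h1]
      by_cases h2 : x = p
      · rw [if_pos h2, ih]
        simp [h2]
      · rw [if_neg h2, ih]
        simp [h1, h2]

-- ===== VERDICT (by name: the statement is the Claim_ definition above) =====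
theorem arrange_attendees_by_priority_spec : Claim_equal_arrange_attendees_by_priority := by
  intro attendees priority _
  unfold Spec_arrange_attendees_by_priority
  unfold arrange_attendees_by_priority arrange_attendees_by_priority_alt
  dsimp only
  rw [alt_fold]
  set f := attendees.filter (fun y => decide (y < priority)) with hf
  set g := attendees.filter (fun y => !decide (y < priority)) with hg
  -- first pass
  have e0 : (0 : Int) = ((([] : List Int).length : Int) + (([] : List Int).length : Int)) := by simp
  have en : (attendees.length : Int)
      = (([] : List Int).length : Int) + (([] : List Int).length : Int) + (attendees.length : Int) := by simp
  have est : attendees = ([] : List Int) ++ ([] : List Int) ++ attendees := by simp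
  have h1 := loop_inv (fun v => v < priority) attendees [] []
  simp only [List.length_nil, Nat.cast_zero, zero_add, List.nil_append, List.append_nil] at h1
  rw [h1]
  -- second pass
  have hfg : (attendees.length : Int) = (f.length : Int) + (g.length : Int) := by
    have h := List.length_eq_length_filter_add (l := attendees) (fun y => decide (y < priority))
    rw [hf, hg]
    omega
  have h2 := loop_inv (fun v => v = priority) g f []
  simp only [List.length_nil, Nat.cast_zero, add_zero, List.append_nil] at h2
  simp only [Nat.cast_add] at h1 h2 ⊢
  rw [hfg, h2]
  simp [List.append_assoc]
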